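-- pv_equiv track=rewrite | github.com/widianingsihh/PBO2024B | Bayu Gunawan/Bayu Gunawan P3/konoha_encripe.py | proses_string
-- ===== SOURCE A (Python) =====
-- def geser_karakter(karakter, jumlah_geser):
--     # Menggeser karakter berdasarkan jumlah geseran dengan memutar kembali ke 'a' jika melebihi 'z'
--     if 'a' <= karakter <= 'z':
--         return chr((ord(karakter) - ord('a') + jumlah_geser) % 26 + ord('a'))
--     elif 'A' <= karakter <= 'Z':
--         return chr((ord(karakter) - ord('A') + jumlah_geser) % 26 + ord('A'))
--     else:
--         return karakter
--
-- def proses_string(input_string):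
--     angka_total = 0
--     huruf_saja = []
--
--     # Memisahkan huruf dan angka, serta menjumlahkan angka
--     for karakter in input_string:
--         if karakter.isdigit():
--             angka_total += int(karakter)
--         elif karakter.isalpha():
--             huruf_saja.append(karakter)
--
--     # Geser huruf sesuai jumlah penjumlahan angka
--     hasil_geser = [geser_karakter(huruf, angka_total) for huruf in huruf_saja]
--
--     # Gabungkan hasil
--     return ''.join(hasil_geser)
-- ===== SOURCE B (Python) =====
-- def proses_string(input_string):
--     # Instead of summing the digits and Caesar-shifting each letter arithmetically,
--     # advance two cipher alphabets by each digit as it streams past (left-rotations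
--     # compose additively mod 26), then map the collected letters once through a
--     # substitution table built from the final alphabets.
--     lo = 'abcdefghijklmnopqrstuvwxyz'
--     up = 'ABCDEFGHIJKLMNOPQRSTUVWXYZ'
--     letters = []
--     for c in input_string:
--         if c.isdigit():
--             d = int(c)
--             lo, up = lo[d:] + lo[:d], up[d:] + up[:d]
--         elif c.isalpha():
--             letters.append(c)
--     table = dict(zip('abcdefghijklmnopqrstuvwxyzABCDEFGHIJKLMNOPQRSTUVWXYZ', lo + up))
--     return ''.join(table.get(c, c) for c in letters)
-- ===== Notes on version B (the rewrite author's own statement) =====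
-- stated objective: alternative
-- what changed: B never computes a digit total or per-character shift arithmetic: it advances two cipher alphabets by a left-rotation for each digit as the string streams past (rotations compose additively mod 26), and then maps the collected letters once through a substitution table (dict) built from the final alphabets.
import Mathlib
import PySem

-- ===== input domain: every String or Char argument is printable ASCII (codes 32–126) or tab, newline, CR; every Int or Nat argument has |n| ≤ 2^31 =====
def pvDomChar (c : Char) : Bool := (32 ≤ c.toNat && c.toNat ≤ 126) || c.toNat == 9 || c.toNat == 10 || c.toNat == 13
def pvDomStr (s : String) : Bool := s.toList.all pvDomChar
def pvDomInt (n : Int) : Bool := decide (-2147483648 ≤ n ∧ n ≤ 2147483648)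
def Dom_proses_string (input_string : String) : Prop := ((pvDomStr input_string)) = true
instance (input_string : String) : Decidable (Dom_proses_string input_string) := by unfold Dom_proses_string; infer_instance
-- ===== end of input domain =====

-- B never computes a digit total: it advances two cipher alphabets by a left-rotation for
-- each digit as the string streams past, then maps the collected letters once through a
-- substitution table (dict) built from the final alphabets; same O(n) cost, alternative structure.

-- ===== PORT A =====
def geser_karakter (karakter : Char) (jumlah_geser : Int) : Char :=
  if 'a' ≤ karakter ∧ karakter ≤ 'z' then
    Char.ofNat ((PySem.Int.mod ((karakter.toNat : Int) - 97 + jumlah_geser) 26 + 97).toNat)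
  else if 'A' ≤ karakter ∧ karakter ≤ 'Z' then
    Char.ofNat ((PySem.Int.mod ((karakter.toNat : Int) - 65 + jumlah_geser) 26 + 65).toNat)
  else karakter

-- int(karakter) for a single digit char is ported as toNat - 48: exact on the ASCII
-- domain, where the guarding karakter.isdigit() means '0' ≤ karakter ≤ '9'.
-- ''.join of a list of 1-character strings is ported as String.ofList of the chars.
def proses_string (input_string : String) : String :=
  let st := input_string.toList.foldl
    (fun (s : Int × List Char) karakter =>
      if PySem.Chars.isdigit karakter then (s.1 + ((karakter.toNat : Int) - 48), s.2)
      else if PySem.Chars.isalpha karakter then (s.1, s.2 ++ [karakter])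
      else s)
    (0, [])
  String.ofList (st.2.map (fun huruf => geser_karakter huruf st.1))

-- ===== PORT B =====
def pvLo : List Char := ['a','b','c','d','e','f','g','h','i','j','k','l','m','n','o','p','q','r','s','t','u','v','w','x','y','z']
def pvUp : List Char := ['A','B','C','D','E','F','G','H','I','J','K','L','M','N','O','P','Q','R','S','T','U','V','W','X','Y','Z']

-- the body of Source B's for-loop, as a named step function over the state (lo, up, letters)
def pvStep (s : List Char × List Char × List Char) (c : Char) : List Char × List Char × List Char :=
  if PySem.Chars.isdigit c then
    let d : Int := (c.toNat : Int) - 48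
    (PySem.List.slice s.1 (some d) none ++ PySem.List.slice s.1 none (some d),
     PySem.List.slice s.2.1 (some d) none ++ PySem.List.slice s.2.1 none (some d),
     s.2.2)
  else if PySem.Chars.isalpha c then (s.1, s.2.1, s.2.2 ++ [c])
  else s

-- faithful to Source B: stream the string rotating the alphabets on each digit (lo[d:]+lo[:d])
-- and collecting letters, then dict(zip(plain, lo+up)) and table.get(c, c) per letter.
def proses_string_alt (input_string : String) : String :=
  let st := input_string.toList.foldl pvStep (pvLo, pvUp, [])
  let table : PySem.Dict Char Char := PySem.Dict.ofList ((pvLo ++ pvUp).zip (st.1 ++ st.2.1))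
  String.ofList (st.2.2.map (fun c => PySem.Dict.getD table c c))

-- ===== PRECONDITION & SPEC =====
def Spec_proses_string (input_string : String) (out : String) : Prop := out = proses_string_alt input_string
instance (input_string : String) (out : String) : Decidable (Spec_proses_string input_string out) := by unfold Spec_proses_string; infer_instance

-- ===== CLAIM (what is proved, stated in full; the proofs are below) =====
def Claim_equal_proses_string : Prop := ∀ (input_string : String), Dom_proses_string input_string → Spec_proses_string input_string (proses_string input_string)

-- ===== LEMMAS AND PROOFS =====

lemma pv_char_le_iff (a c : Char) : a ≤ c ↔ a.toNat ≤ c.toNat := by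
  rw [Char.le_def, UInt32.le_iff_toNat_le]
  exact Iff.rfl

lemma pv_islower_iff (c : Char) : PySem.Chars.islower c = true ↔ 97 ≤ c.toNat ∧ c.toNat ≤ 122 := by
  simp only [PySem.Chars.islower, Bool.and_eq_true, decide_eq_true_eq, Char.le_def,
    UInt32.le_iff_toNat_le, Char.toNat_val]
  simp

lemma pv_isupper_iff (c : Char) : PySem.Chars.isupper c = true ↔ 65 ≤ c.toNat ∧ c.toNat ≤ 90 := by
  simp only [PySem.Chars.isupper, Bool.and_eq_true, decide_eq_true_eq, Char.le_def,
    UInt32.le_iff_toNat_le, Char.toNat_val]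
  simp

lemma pv_isdigit_iff (c : Char) : PySem.Chars.isdigit c = true ↔ 48 ≤ c.toNat ∧ c.toNat ≤ 57 := by
  simp only [PySem.Chars.isdigit, Bool.and_eq_true, decide_eq_true_eq, Char.le_def,
    UInt32.le_iff_toNat_le, Char.toNat_val]
  simp

lemma pv_isalpha_iff (c : Char) :
    PySem.Chars.isalpha c = true ↔ (65 ≤ c.toNat ∧ c.toNat ≤ 90) ∨ (97 ≤ c.toNat ∧ c.toNat ≤ 122) := by
  simp only [PySem.Chars.isalpha, Bool.or_eq_true, pv_isupper_iff, pv_islower_iff]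

lemma pv_digit_not_alpha (c : Char) (h : PySem.Chars.isdigit c = true) :
    PySem.Chars.isalpha c = false := by
  rw [pv_isdigit_iff] at h
  rw [← Bool.not_eq_true, pv_isalpha_iff]
  omega

-- the digit sum of a string, as a natural number
def pvDigSum (l : List Char) : Nat :=
  ((l.filter PySem.Chars.isdigit).map (fun c => c.toNat - 48)).sum

-- A's Int-valued digit sum is the cast of the Nat-valued one
lemma pv_sum_cast (l : List Char) :
    ((l.filter PySem.Chars.isdigit).map (fun c => (c.toNat : Int) - 48)).sum = (pvDigSum l : Int) := by
  induction l with
  | nil => simp [pvDigSum]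
  | cons c rest ih =>
    by_cases hd : PySem.Chars.isdigit c = true
    · have hr := (pv_isdigit_iff c).mp hd
      have hsum : pvDigSum (c :: rest) = (c.toNat - 48) + pvDigSum rest := by
        simp [pvDigSum, hd]
      rw [List.filter_cons_of_pos hd, List.map_cons, List.sum_cons, ih, hsum]
      push_cast
      omega
    · simp only [pvDigSum, List.filter_cons, hd, Bool.false_eq_true, if_neg,
        not_false_iff] at *
      simpa [pvDigSum] using ih

-- Source B's lo[d:] + lo[:d] is List.rotate
lemma pv_rot (l : List Char) (d : Int) (h0 : 0 ≤ d) (h1 : d.toNat ≤ l.length) :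
    PySem.List.slice l (some d) none ++ PySem.List.slice l none (some d) = l.rotate d.toNat := by
  rw [PySem.List.slice_from _ h0, PySem.List.slice_to _ h0, List.rotate_eq_drop_append_take h1]

-- the components of A's loop state, as named step functions
def pvStepSum : Int → Char → Int :=
  fun a c => if PySem.Chars.isdigit c then a + ((c.toNat : Int) - 48) else a
def pvStepLetters : List Char → Char → List Char :=
  fun xs c => if PySem.Chars.isalpha c then xs ++ [c] else xs

-- A's single loop over the string is a digit sum paired with a letter filter
lemma pv_loop_split (l : List Char) :
    l.foldl
      (fun (s : Int × List Char) c =>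
        if PySem.Chars.isdigit c then (s.1 + ((c.toNat : Int) - 48), s.2)
        else if PySem.Chars.isalpha c then (s.1, s.2 ++ [c])
        else s)
      (0, []) =
    (((l.filter PySem.Chars.isdigit).map (fun c => (c.toNat : Int) - 48)).sum,
     l.filter PySem.Chars.isalpha) := by
  have hstep :
      (fun (s : Int × List Char) c =>
        if PySem.Chars.isdigit c then (s.1 + ((c.toNat : Int) - 48), s.2)
        else if PySem.Chars.isalpha c then (s.1, s.2 ++ [c])
        else s) =
      (fun (s : Int × List Char) c => (pvStepSum s.1 c, pvStepLetters s.2 c)) := by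
    funext s c
    simp only [pvStepSum, pvStepLetters]
    by_cases hd : PySem.Chars.isdigit c = true
    · simp [hd, pv_digit_not_alpha c hd]
    · by_cases ha : PySem.Chars.isalpha c = true <;> simp [hd, ha]
  rw [hstep, PySem.List.foldl_prod_mk]
  refine Prod.ext ?_ ?_
  · show List.foldl pvStepSum 0 l = _
    unfold pvStepSum
    rw [PySem.List.foldl_if_eq_foldl_filter (p := PySem.Chars.isdigit)
          (f := fun (a : Int) (c : Char) => a + ((c.toNat : Int) - 48)),
        PySem.List.foldl_add]
    simp
  · show List.foldl pvStepLetters [] l = _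
    unfold pvStepLetters
    rw [PySem.List.foldl_append_if_eq_filter]
    simp

-- B's loop invariant: the alphabets end up rotated by the digit sum, the letters filtered
lemma pv_fold_inv (l : List Char) : ∀ (a b acc : List Char), a.length = 26 → b.length = 26 →
    l.foldl pvStep (a, b, acc) =
      (a.rotate (pvDigSum l), b.rotate (pvDigSum l), acc ++ l.filter PySem.Chars.isalpha) := by
  induction l with
  | nil => intro a b acc _ _; simp [pvDigSum]
  | cons c rest ih =>
    intro a b acc ha hb
    by_cases hd : PySem.Chars.isdigit c = true
    · have hr := (pv_isdigit_iff c).mp hd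
      have h0 : (0:Int) ≤ (c.toNat : Int) - 48 := by omega
      have htn : ((c.toNat : Int) - 48).toNat = c.toNat - 48 := by omega
      have hstep : pvStep (a, b, acc) c =
          (a.rotate (c.toNat - 48), b.rotate (c.toNat - 48), acc) := by
        simp only [pvStep, hd, if_pos]
        rw [pv_rot a _ h0 (by omega), pv_rot b _ h0 (by omega), htn]
      rw [List.foldl_cons, hstep,
          ih _ _ _ (by rw [List.length_rotate]; exact ha) (by rw [List.length_rotate]; exact hb),
          List.rotate_rotate, List.rotate_rotate]
      have hsum : pvDigSum (c :: rest) = (c.toNat - 48) + pvDigSum rest := by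
        simp [pvDigSum, hd]
      rw [hsum]
      simp [pv_digit_not_alpha c hd]
    · by_cases hal : PySem.Chars.isalpha c = true
      · have hstep : pvStep (a, b, acc) c = (a, b, acc ++ [c]) := by
          simp [pvStep, hd, hal]
        rw [List.foldl_cons, hstep, ih _ _ _ ha hb]
        have hsum : pvDigSum (c :: rest) = pvDigSum rest := by
          simp [pvDigSum, hd]
        simp [hsum, hal]
      · have hstep : pvStep (a, b, acc) c = (a, b, acc) := by
          simp [pvStep, hd, hal]
        rw [List.foldl_cons, hstep, ih _ _ _ ha hb]
        have hsum : pvDigSum (c :: rest) = pvDigSum rest := by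
          simp [pvDigSum, hd]
        simp [hsum, hal]

-- the substitution table built from alphabets rotated by k
def pvTbl (k : Nat) : PySem.Dict Char Char :=
  PySem.Dict.ofList ((pvLo ++ pvUp).zip (pvLo.rotate k ++ pvUp.rotate k))

set_option maxRecDepth 10000 in
set_option maxHeartbeats 2000000 in
lemma pv_tbl_lo : ∀ k < 26, ∀ i < 26,
    (pvTbl k).getD (Char.ofNat (97 + i)) (Char.ofNat (97 + i)) = Char.ofNat (97 + (i + k) % 26) := by
  decide

set_option maxRecDepth 10000 in
set_option maxHeartbeats 2000000 in
lemma pv_tbl_up : ∀ k < 26, ∀ i < 26,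
    (pvTbl k).getD (Char.ofNat (65 + i)) (Char.ofNat (65 + i)) = Char.ofNat (65 + (i + k) % 26) := by
  decide

-- rotating by S equals rotating by S % 26 (the alphabets have 26 letters)
lemma pv_rotate_mod_lo (S : Nat) : pvLo.rotate S = pvLo.rotate (S % 26) := by
  conv_lhs => rw [← List.rotate_mod]
  rw [show pvLo.length = 26 from rfl]
lemma pv_rotate_mod_up (S : Nat) : pvUp.rotate S = pvUp.rotate (S % 26) := by
  conv_lhs => rw [← List.rotate_mod]
  rw [show pvUp.length = 26 from rfl]

-- per-character agreement: A's shift arithmetic equals B's table lookup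
lemma pv_char_agree (S : Nat) (c : Char) (hc : PySem.Chars.isalpha c = true) :
    geser_karakter c (S : Int) =
      PySem.Dict.getD
        (PySem.Dict.ofList ((pvLo ++ pvUp).zip (pvLo.rotate S ++ pvUp.rotate S))) c c := by
  have h0 : (0:Int) < 26 := by norm_num
  rw [pv_rotate_mod_lo, pv_rotate_mod_up]
  have hk : S % 26 < 26 := Nat.mod_lt _ (by norm_num)
  rw [pv_isalpha_iff] at hc
  rcases hc with hupc | hloc
  · -- upper-case letter
    have hiz : c.toNat - 65 < 26 := by omega
    have hco : Char.ofNat (65 + (c.toNat - 65)) = c := by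
      rw [show 65 + (c.toNat - 65) = c.toNat by omega, Char.ofNat_toNat]
    have htbl := pv_tbl_up (S % 26) hk (c.toNat - 65) hiz
    rw [hco] at htbl
    rw [show PySem.Dict.ofList ((pvLo ++ pvUp).zip (pvLo.rotate (S % 26) ++ pvUp.rotate (S % 26))) = pvTbl (S % 26) from rfl,
        htbl]
    have hnotlo : ¬ ('a' ≤ c ∧ c ≤ 'z') := by
      rintro ⟨h1, -⟩
      have := (pv_char_le_iff 'a' c).mp h1
      have : (97:Nat) ≤ c.toNat := le_trans (by decide) this
      omega
    rw [geser_karakter, if_neg hnotlo,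
        if_pos ⟨(pv_char_le_iff 'A' c).mpr (le_trans (by decide) hupc.1),
                (pv_char_le_iff c 'Z').mpr (le_trans hupc.2 (by decide))⟩]
    congr 1
    rw [PySem.Int.mod_eq_emod_of_pos h0]
    omega
  · -- lower-case letter
    have hiz : c.toNat - 97 < 26 := by omega
    have hco : Char.ofNat (97 + (c.toNat - 97)) = c := by
      rw [show 97 + (c.toNat - 97) = c.toNat by omega, Char.ofNat_toNat]
    have htbl := pv_tbl_lo (S % 26) hk (c.toNat - 97) hiz
    rw [hco] at htbl
    rw [show PySem.Dict.ofList ((pvLo ++ pvUp).zip (pvLo.rotate (S % 26) ++ pvUp.rotate (S % 26))) = pvTbl (S % 26) from rfl,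
        htbl]
    rw [geser_karakter,
        if_pos ⟨(pv_char_le_iff 'a' c).mpr (le_trans (by decide) hloc.1),
                (pv_char_le_iff c 'z').mpr (le_trans hloc.2 (by decide))⟩]
    congr 1
    rw [PySem.Int.mod_eq_emod_of_pos h0]
    omega

lemma pv_AB (input_string : String) :
    proses_string input_string = proses_string_alt input_string := by
  rw [proses_string, proses_string_alt, pv_loop_split,
      pv_fold_inv input_string.toList pvLo pvUp [] rfl rfl]
  simp only [List.nil_append, pv_sum_cast]
  congr 1
  exact List.map_congr_left (fun c hc => pv_char_agree _ c (List.of_mem_filter hc))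

-- ===== VERDICT (by name: the statement is the Claim_ definition above) =====
theorem proses_string_spec : Claim_equal_proses_string := by
  intro s _
  unfold Spec_proses_string
  exact pv_AB s
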